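-- pv_equiv track=rewrite | github.com/natalka1122/advent_of_code | 2015/19/main2_backup2.py | f
-- ===== SOURCE A (Python) =====
-- def f(lines: set[str], replacements: dict[str, set[str]]) -> set[str]:
--     if len(lines) == 0:
--         raise NotImplementedError
--     result = set()
--     for line in lines:
--         for index in range(len(line)):
--             for source, targets in replacements.items():
--                 if line[index:].startswith(source):
--                     for target in targets:
--                         if len(target) < len(source):
--                             value = line[:index] + target + line[index + len(source) :]
--                             result.add(value)
--     return result
-- ===== SOURCE B (Python) =====
-- def f(lines: set[str], replacements: dict[str, set[str]]) -> set[str]: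
--     if len(lines) == 0:
--         raise NotImplementedError
--     # Prefilter: keep only shortening targets, and index the surviving
--     # (source, short_targets) pairs by the first character of the source.
--     pairs = []
--     for source, targets in replacements.items():
--         short = [t for t in targets if len(t) < len(source)]
--         if short:
--             pairs.append((source[0], (source, short)))
--     buckets = {}
--     for ch, pair in pairs:
--         buckets.setdefault(ch, []).append(pair)
--     result = set()
--     for line in lines:
--         for index, ch in enumerate(line):
--             for source, short in buckets.get(ch, []):
--                 if line.startswith(source, index):
--                     base = line[:index]
--                     rest = line[index + len(source):]
--                     for target in short:
--                         result.add(base + target + rest)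
--     return result
-- ===== Notes on version B (the rewrite author's own statement) =====
-- stated objective: faster
-- what changed: B filters each source's shortening targets once up front and indexes the surviving (source, targets) pairs by the first character of the source, so each position of a line does one dict lookup into a small bucket instead of scanning every replacement and re-filtering its targets.
import Mathlib
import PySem

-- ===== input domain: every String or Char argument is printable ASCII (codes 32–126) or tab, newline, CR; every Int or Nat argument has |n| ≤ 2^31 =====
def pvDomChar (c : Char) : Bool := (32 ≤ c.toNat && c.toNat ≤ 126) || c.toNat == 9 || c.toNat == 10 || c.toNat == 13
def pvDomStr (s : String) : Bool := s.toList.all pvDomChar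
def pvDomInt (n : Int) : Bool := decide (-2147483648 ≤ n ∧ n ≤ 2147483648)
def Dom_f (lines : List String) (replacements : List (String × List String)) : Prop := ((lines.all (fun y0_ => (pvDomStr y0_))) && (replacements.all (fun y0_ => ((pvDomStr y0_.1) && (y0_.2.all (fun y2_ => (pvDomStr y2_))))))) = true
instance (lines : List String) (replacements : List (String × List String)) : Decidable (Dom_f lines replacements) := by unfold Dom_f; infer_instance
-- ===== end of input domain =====

-- B prefilters shortening targets once and buckets the replacement pairs by the first character
-- of their source, so each line position consults only the pairs that can match there.
-- Equivalence (same result list, same insertion order) is proved on nonempty `lines`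
-- (A raises NotImplementedError on the empty set).

-- ===== PORT A =====
def f (lines : List String) (replacements : List (String × List String)) : List String :=
  lines.foldl (fun result line =>
    (PySem.List.pyRange 0 (PySem.Str.len line) 1).foldl (fun result index =>
      replacements.foldl (fun result p =>
        if PySem.Str.startswith (PySem.Str.slice line (some index) none) p.1 then
          p.2.foldl (fun result target =>
            if PySem.Str.len target < PySem.Str.len p.1 then
              PySem.Set.add result
                (PySem.Str.slice line none (some index) ++ target ++
                 PySem.Str.slice line (some (index + PySem.Str.len p.1)) none)
            else result) result
        else result) result) result) PySem.Set.empty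

-- ===== PORT B =====
-- [t for t in targets if len(t) < len(source)]
def pvShort (source : String) (targets : List String) : List String :=
  targets.filter (fun t => PySem.Str.len t < PySem.Str.len source)

-- the `pairs` list; `source[0]` is ported as `headD default`, exact because the guard
-- (`short` nonempty) forces `source` to be nonempty
def pvPairs (replacements : List (String × List String)) :
    List (Char × (String × List String)) :=
  replacements.foldl (fun acc p =>
    if (pvShort p.1 p.2).isEmpty then acc
    else acc ++ [(p.1.toList.headD default, (p.1, pvShort p.1 p.2))]) []

-- buckets.setdefault(ch, []).append(pair)
def pvBuckets (replacements : List (String × List String)) :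
    PySem.Dict Char (List (String × List String)) :=
  (pvPairs replacements).foldl (fun d q => d.modify q.1 [] (· ++ [q.2])) PySem.Dict.empty

-- line.startswith(source, index) is exact as startswith on the suffix line[index:]
def f_alt (lines : List String) (replacements : List (String × List String)) : List String :=
  let buckets := pvBuckets replacements
  lines.foldl (fun result line =>
    (PySem.List.enumerate line.toList 0).foldl (fun result ic =>
      (buckets.getD ic.2 []).foldl (fun result p =>
        if PySem.Str.startswith (PySem.Str.slice line (some ic.1) none) p.1 then
          let base := PySem.Str.slice line none (some ic.1)
          let rest := PySem.Str.slice line (some (ic.1 + PySem.Str.len p.1)) none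
          p.2.foldl (fun result target => PySem.Set.add result (base ++ target ++ rest)) result
        else result) result) result) PySem.Set.empty

-- ===== PRECONDITION & SPEC =====
-- A raises NotImplementedError on the empty set of lines; Pre_ excludes exactly that input.
def Pre_f (lines : List String) (replacements : List (String × List String)) : Prop :=
  lines ≠ []
instance (lines : List String) (replacements : List (String × List String)) : Decidable (Pre_f lines replacements) := by unfold Pre_f; infer_instance

def pvWitness_f : List String × (List (String × List String)) :=
  (["HOH"], [("HO", ["H"])])

def Spec_f (lines : List String) (replacements : List (String × List String)) (out : List String) : Prop := out = f_alt lines replacements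
instance (lines : List String) (replacements : List (String × List String)) (out : List String) : Decidable (Spec_f lines replacements out) := by unfold Spec_f; infer_instance

-- ===== CLAIM (what is proved, stated in full; the proofs are below) =====
def Claim_equal_f : Prop := ∀ (lines : List String) (replacements : List (String × List String)), Dom_f lines replacements → Pre_f lines replacements → Spec_f lines replacements (f lines replacements)


-- ===== LEMMAS AND PROOFS =====

-- B's prefilter: folding the shortening guard over all targets = folding plain adds over pvShort
theorem pv_targets (source : String) (targets : List String) (v : String → String)
    (result : List String) :
    targets.foldl (fun r t =>
        if PySem.Str.len t < PySem.Str.len source then PySem.Set.add r (v t) else r) result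
      = (pvShort source targets).foldl (fun r t => PySem.Set.add r (v t)) result := by
  unfold pvShort
  rw [List.foldl_filter]
  simp only [decide_eq_true_eq]

theorem pv_pairs_eq (replacements : List (String × List String)) :
    pvPairs replacements
      = (replacements.filter (fun p => !(pvShort p.1 p.2).isEmpty)).map
          (fun p => (p.1.toList.headD default, (p.1, pvShort p.1 p.2))) := by
  unfold pvPairs
  have hfun : (fun (acc : List (Char × (String × List String))) (p : String × List String) =>
        if (pvShort p.1 p.2).isEmpty then acc
        else acc ++ [(p.1.toList.headD default, (p.1, pvShort p.1 p.2))])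
      = (fun acc p =>
        if (!(pvShort p.1 p.2).isEmpty) = true then
          acc ++ [(p.1.toList.headD default, (p.1, pvShort p.1 p.2))] else acc) := by
    funext acc p
    cases h : (pvShort p.1 p.2).isEmpty
    · simp
    · simp
  rw [hfun, PySem.List.foldl_append_if]
  simp

theorem pv_bucket (replacements : List (String × List String)) (c : Char) :
    (pvBuckets replacements).getD c []
      = (replacements.filter (fun p =>
            ((p.1.toList.headD default, (p.1, pvShort p.1 p.2)).1 == c)
              && !(pvShort p.1 p.2).isEmpty)).map
          (fun p => (p.1, pvShort p.1 p.2)) := by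
  unfold pvBuckets
  rw [PySem.Dict.getD_foldl_modify_append, PySem.Dict.getD_empty, pv_pairs_eq,
    List.filter_map, List.filter_filter, List.map_map]
  simp [Function.comp]

-- per-position: A's scan over all replacements = B's scan over the bucket of line[j]
theorem pv_index (line : String) (replacements : List (String × List String))
    (j : Int) (h0 : 0 ≤ j) (h1 : j.toNat < line.toList.length) (result : List String) :
    replacements.foldl (fun result p =>
        if PySem.Str.startswith (PySem.Str.slice line (some j) none) p.1 then
          p.2.foldl (fun result target =>
            if PySem.Str.len target < PySem.Str.len p.1 then
              PySem.Set.add result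
                (PySem.Str.slice line none (some j) ++ target ++
                 PySem.Str.slice line (some (j + PySem.Str.len p.1)) none)
            else result) result
        else result) result
      = ((pvBuckets replacements).getD (line.toList[j.toNat]) []).foldl (fun result p =>
          if PySem.Str.startswith (PySem.Str.slice line (some j) none) p.1 then
            p.2.foldl (fun result target =>
              PySem.Set.add result
                (PySem.Str.slice line none (some j) ++ target ++
                 PySem.Str.slice line (some (j + PySem.Str.len p.1)) none)) result
          else result) result := by
  rw [pv_bucket, List.foldl_map, List.foldl_filter]
  apply PySem.List.foldl_congr_mem
  intro acc p _
  rw [pv_targets p.1 p.2 _ acc]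
  by_cases hS : (pvShort p.1 p.2).isEmpty
  · have hnil : pvShort p.1 p.2 = [] := List.isEmpty_iff.mp hS
    rw [hnil]
    simp
  · by_cases hc : p.1.toList.head?.getD 'A' = line.toList[j.toNat]
    · have hS' : (pvShort p.1 p.2).isEmpty = false := Bool.eq_false_iff.mpr hS
      have hcond : ((p.1.toList.headD default, p.1, pvShort p.1 p.2).1 == line.toList[j.toNat]
          && !(pvShort p.1 p.2).isEmpty) = true := by
        rw [hS']
        simp [hc]
      rw [hcond]
      rfl
    · have hne : p.1.toList ≠ [] := by
        have hne' : pvShort p.1 p.2 ≠ [] := fun h => hS (by simp [h])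
        obtain ⟨t, ht⟩ := List.exists_mem_of_ne_nil _ hne'
        have hlt : PySem.Str.len t < PySem.Str.len p.1 := by
          have := List.of_mem_filter (by exact ht)
          simpa using this
        intro h
        rw [PySem.Str.len_eq, PySem.Str.len_eq, h] at hlt
        simp at hlt
        omega
      have hsw : PySem.Str.startswith (PySem.Str.slice line (some j) none) p.1 = false := by
        rw [Bool.eq_false_iff]
        intro hswt
        rw [PySem.Str.startswith_eq] at hswt
        have hdrop : (PySem.Str.slice line (some j) none).toList
            = line.toList.drop j.toNat := by
          simp [PySem.Str.toList_slice, PySem.Chars.slice_eq_listSlice,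
            PySem.List.slice_from _ h0]
        rw [hdrop, PySem.Chars.startswith_iff] at hswt
        obtain ⟨tail, htail⟩ := hswt
        have hlend : (line.toList.drop j.toNat) ≠ [] := by
          apply List.ne_nil_of_length_pos
          simp only [List.length_drop]
          omega
        have hhead : (line.toList.drop j.toNat).head?.getD 'A'
            = p.1.toList.head?.getD 'A' := by
          rw [← htail]
          cases hpl : p.1.toList with
          | nil => exact absurd hpl hne
          | cons a as => simp
        have hd : (line.toList.drop j.toNat).head?.getD 'A' = line.toList[j.toNat] := by
          rw [List.head?_eq_some_head hlend]
          simp [List.head_drop]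
        exact hc (hhead.symm.trans hd)
      have hcond : ((p.1.toList.headD default, p.1, pvShort p.1 p.2).1 == line.toList[j.toNat]
          && !(pvShort p.1 p.2).isEmpty) = false := by
        simp [hc]
      rw [hcond, hsw]
      simp

-- per-line: A's index loop = B's enumerate loop with the bucket lookup
theorem pv_line (replacements : List (String × List String)) (line : String)
    (result : List String) :
    (PySem.List.pyRange 0 (PySem.Str.len line)).foldl (fun result index =>
        replacements.foldl (fun result p =>
          if PySem.Str.startswith (PySem.Str.slice line (some index) none) p.1 then
            p.2.foldl (fun result target =>
              if PySem.Str.len target < PySem.Str.len p.1 then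
                PySem.Set.add result
                  (PySem.Str.slice line none (some index) ++ target ++
                   PySem.Str.slice line (some (index + PySem.Str.len p.1)) none)
              else result) result
          else result) result) result
      = (PySem.List.enumerate line.toList 0).foldl (fun result ic =>
          ((pvBuckets replacements).getD ic.2 []).foldl (fun result p =>
            if PySem.Str.startswith (PySem.Str.slice line (some ic.1) none) p.1 then
              p.2.foldl (fun result target =>
                PySem.Set.add result
                  (PySem.Str.slice line none (some ic.1) ++ target ++
                   PySem.Str.slice line (some (ic.1 + PySem.Str.len p.1)) none)) result
            else result) result) result := by
  rw [PySem.List.enumerate_eq_map_pyRange line.toList default, List.foldl_map]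
  have hlen : PySem.List.len line.toList = PySem.Str.len line := by
    simp [PySem.Str.len_eq, PySem.List.len_eq]
  rw [hlen]
  apply PySem.List.foldl_congr_mem
  intro acc j hj
  obtain ⟨hj0, hj1⟩ := PySem.List.mem_pyRange_one.mp hj
  have hjl : j.toNat < line.toList.length := by
    rw [PySem.Str.len_eq] at hj1; omega
  rw [PySem.List.pyGetD_eq_getElem line.toList default hj0
    (by rw [PySem.Str.len_eq] at hj1; exact_mod_cast hj1)]
  exact pv_index line replacements j hj0 hjl acc

theorem pv_main : ∀ (lines : List String) (replacements : List (String × List String)),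
    f lines replacements = f_alt lines replacements := by
  intro lines replacements
  simp only [f, f_alt]
  apply PySem.List.foldl_congr_mem
  intro acc line _
  exact pv_line replacements line acc

-- ===== VERDICT (by name: the statement is the Claim_ definition above) =====
theorem f_spec : Claim_equal_f := by
  intro lines replacements _ _
  unfold Spec_f
  exact pv_main lines replacements
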